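-- pv_equiv track=rewrite | github.com/ade5t/spo | venv/global_func_val.py | folding
-- ===== SOURCE A (Python) =====
-- def folding(str):
--     tmp_index = 0
--     prev_tmp_index = 0
--     while tmp_index < len(str):
--         tmp_str = ""
--         num_min = 0
--         if (str[tmp_index] == "-"):
--             prev_tmp_index = tmp_index
--             while (tmp_index < len(str) and str[tmp_index] == "-"):
--                 num_min +=1
--                 tmp_index +=1
--             if (num_min % 2 == 0 and num_min > 1):
--                 tmp_str += str[0: prev_tmp_index]
--                 if (len(tmp_str) > 0 and ((tmp_str[len(tmp_str)-1]).isnumeric() or tmp_str[len(tmp_str)-1] == ")")): tmp_str += "+"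
--                 tmp_str += str[tmp_index: len(str)]
--                 str = tmp_str
--                 tmp_index = prev_tmp_index
--             else:
--                 tmp_str += str[0: prev_tmp_index]
--                 tmp_str += "-"
--                 tmp_str += str[tmp_index: len(str)]
--                 str = tmp_str
--                 tmp_index = prev_tmp_index
--         tmp_index += 1
--     return str
-- ===== SOURCE B (Python) =====
-- def folding(str):
--     # One left-to-right pass: count each maximal run of '-' and emit its
--     # collapsed form (odd run -> '-'; even run -> '+' after a digit or ')', else nothing).
--     out = []
--     run = 0
--     for ch in str:
--         if ch == '-':
--             run += 1
--         else:
--             if run: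
--                 if run % 2:
--                     out.append('-')
--                 elif out and (out[-1].isnumeric() or out[-1] == ')'):
--                     out.append('+')
--                 run = 0
--             out.append(ch)
--     if run:
--         if run % 2:
--             out.append('-')
--         elif out and (out[-1].isnumeric() or out[-1] == ')'):
--             out.append('+')
--     return ''.join(out)
-- ===== Notes on version B (the rewrite author's own statement) =====
-- stated objective: faster
-- what changed: Replaces A's index-walking loop that repeatedly rebuilds the whole string by slicing with a single left-to-right pass that counts each run of minuses and appends its collapsed form to an output list.
import Mathlib
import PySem

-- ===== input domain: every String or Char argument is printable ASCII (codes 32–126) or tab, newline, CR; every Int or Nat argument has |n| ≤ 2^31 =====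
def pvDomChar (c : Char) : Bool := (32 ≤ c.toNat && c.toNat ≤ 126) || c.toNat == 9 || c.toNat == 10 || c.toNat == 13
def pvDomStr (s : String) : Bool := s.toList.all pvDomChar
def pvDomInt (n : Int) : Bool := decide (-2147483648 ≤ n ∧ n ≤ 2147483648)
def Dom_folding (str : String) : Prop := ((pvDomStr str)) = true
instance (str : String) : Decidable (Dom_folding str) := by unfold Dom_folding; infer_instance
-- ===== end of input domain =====

-- B collapses each run of minuses in one left-to-right pass instead of A's repeated
-- slice-and-rebuild loop; return values agree (str.isnumeric is exact as isdigit on Dom's ASCII).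

-- ===== PORT A =====

-- inner while loop of A: counts the leading '-' characters of the remaining suffix
def aMinusRun : List Char → Nat
  | [] => 0
  | c :: t => if c = '-' then aMinusRun t + 1 else 0

-- A's test '(tmp_str[len-1]).isnumeric() or tmp_str[len-1] == ")"' (isnumeric = isdigit on ASCII)
def aPlusOk (t : List Char) : Bool :=
  match t.getLast? with
  | some c => PySem.Chars.isdigit c || c = ')'
  | none => false

-- cited by the loop's decreasing_by: the inner while makes at least one step when str[i] = '-'
lemma aMinusRun_pos (t : List Char) (h : t.head? = some '-') : 1 ≤ aMinusRun t := by
  cases t with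
  | nil => simp at h
  | cons c r => simp at h; simp [aMinusRun, h]

-- the outer while loop of A; state = (current string, tmp_index); prev_tmp_index = i;
-- the slices str[0:prev], str[tmp_index:len] are take/drop (indices in range, so exact)
def foldingLoop (s : List Char) (i : Nat) : List Char :=
  if h : i < s.length then
    if hc : s[i] = '-' then
      let k := aMinusRun (s.drop i)   -- num_min; after the inner while tmp_index = i + k
      if k % 2 = 0 ∧ 1 < k then
        let t1 := s.take i
        let t2 := if t1.length > 0 && aPlusOk t1 then t1 ++ ['+'] else t1
        foldingLoop (t2 ++ s.drop (i + k)) (i + 1)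
      else
        foldingLoop (s.take i ++ ['-'] ++ s.drop (i + k)) (i + 1)
    else foldingLoop s (i + 1)
  else s
termination_by s.length - i
decreasing_by
  · have hk : 1 ≤ aMinusRun (s.drop i) := by
      apply aMinusRun_pos
      rw [List.head?_drop]
      simp [h, hc]
    simp only [List.length_append, List.length_take, List.length_drop]
    split
    · rename_i hcond
      simp only [List.length_append, List.length_take, List.length_cons, List.length_nil]
      omega
    · simp only [List.length_take]
      omega
  · have hk : 1 ≤ aMinusRun (s.drop i) := by
      apply aMinusRun_pos
      rw [List.head?_drop]
      simp [h, hc]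
    simp only [List.length_append, List.length_take, List.length_drop, List.length_cons,
      List.length_nil]
    omega
  · omega

def folding (str : String) : String := String.mk (foldingLoop str.toList 0)

-- ===== PORT B =====

-- B's test 'out[-1].isnumeric() or out[-1] == ")"' (isnumeric = isdigit on ASCII)
def bPlusOk (out : List Char) : Bool :=
  match out.getLast? with
  | some c => PySem.Chars.isdigit c || c = ')'
  | none => false

-- B's flush of the pending run (before a non-minus char, and once at the end)
def bFlush (out : List Char) (run : Nat) : List Char :=
  if run ≠ 0 then
    if run % 2 = 1 then out ++ ['-']
    else if !out.isEmpty && bPlusOk out then out ++ ['+']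
    else out
  else out

-- B's loop body over one character
def bStep : (List Char × Nat) → Char → (List Char × Nat)
  | (out, run), ch => if ch = '-' then (out, run + 1) else (bFlush out run ++ [ch], 0)

def folding_alt (str : String) : String :=
  let p := str.toList.foldl bStep ([], 0)
  String.mk (bFlush p.1 p.2)

-- ===== PRECONDITION & SPEC =====
def Spec_folding (str : String) (out : String) : Prop := out = folding_alt str
instance (str : String) (out : String) : Decidable (Spec_folding str out) := by unfold Spec_folding; infer_instance

-- ===== CLAIM (what is proved, stated in full; the proofs are below) =====
def Claim_equal_folding : Prop := ∀ (str : String), Dom_folding str → Spec_folding str (folding str)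

-- ===== LEMMAS AND PROOFS =====

-- B's remaining computation from an intermediate state (out, run) on the remaining suffix
def bRun (out : List Char) (run : Nat) (rest : List Char) : List Char :=
  let p := rest.foldl bStep (out, run)
  bFlush p.1 p.2

lemma bFlush_zero (out : List Char) : bFlush out 0 = out := by simp [bFlush]

lemma bRun_nil (out : List Char) (run : Nat) : bRun out run [] = bFlush out run := rfl

lemma bRun_cons_ne (out : List Char) (run : Nat) (c : Char) (rest : List Char) (hc : c ≠ '-') :
    bRun out run (c :: rest) = bRun (bFlush out run ++ [c]) 0 rest := by
  simp [bRun, bStep, hc]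

lemma bRun_replicate (k : Nat) (out : List Char) (run : Nat) (rest : List Char) :
    bRun out run (List.replicate k '-' ++ rest) = bRun out (run + k) rest := by
  induction k generalizing run with
  | zero => simp
  | succ n ih =>
    simp only [List.replicate_succ, List.cons_append]
    have : bRun out run ('-' :: (List.replicate n '-' ++ rest))
         = bRun out (run + 1) (List.replicate n '-' ++ rest) := by
      simp [bRun, bStep]
    rw [this, ih]
    ring_nf

lemma bRun_flush (out : List Char) (run : Nat) (rest : List Char)
    (h : rest.head? ≠ some '-') : bRun out run rest = bRun (bFlush out run) 0 rest := by
  cases rest with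
  | nil => simp [bRun_nil, bFlush_zero]
  | cons c r =>
    have hc : c ≠ '-' := by simpa using h
    rw [bRun_cons_ne _ _ _ _ hc, bRun_cons_ne _ _ _ _ hc, bFlush_zero]

lemma aMinusRun_take (l : List Char) :
    l.take (aMinusRun l) = List.replicate (aMinusRun l) '-' := by
  induction l with
  | nil => simp [aMinusRun]
  | cons c t ih =>
    by_cases hc : c = '-'
    · subst hc; simp [aMinusRun, List.replicate_succ, ih]
    · simp [aMinusRun, hc]

lemma aMinusRun_head_drop (l : List Char) :
    (l.drop (aMinusRun l)).head? ≠ some '-' := by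
  induction l with
  | nil => simp [aMinusRun]
  | cons c t ih =>
    by_cases hc : c = '-'
    · subst hc; simpa [aMinusRun] using ih
    · simp [aMinusRun, hc]

lemma aMinusRun_decomp (l : List Char) :
    List.replicate (aMinusRun l) '-' ++ l.drop (aMinusRun l) = l := by
  rw [← aMinusRun_take]; exact List.take_append_drop _ _

lemma aMinusRun_le (l : List Char) : aMinusRun l ≤ l.length := by
  induction l with
  | nil => simp [aMinusRun]
  | cons c t ih => by_cases hc : c = '-' <;> simp [aMinusRun, hc] <;> omega

lemma aPlusOk_eq_bPlusOk (t : List Char) : aPlusOk t = bPlusOk t := rfl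

-- main invariant of the equivalence: A's loop on done ++ rest at index |done|
-- computes exactly B's remaining run from the state (done, 0)
lemma loop_eq (n : Nat) : ∀ rest : List Char, rest.length ≤ n → ∀ done : List Char,
    foldingLoop (done ++ rest) done.length = bRun done 0 rest := by
  induction n with
  | zero =>
    intro rest hlen done
    have : rest = [] := by cases rest <;> simp_all
    subst this
    rw [foldingLoop]
    simp [bRun_nil, bFlush_zero]
  | succ n ih =>
    intro rest hlen done
    cases hrest : rest with
    | nil =>
      rw [foldingLoop]
      simp [bRun_nil, bFlush_zero]
    | cons c rest' =>
      subst hrest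
      have hi : done.length < (done ++ c :: rest').length := by simp
      have hgi : (done ++ c :: rest')[done.length]'hi = c := by
        rw [List.getElem_append_right le_rfl]
        simp
      by_cases hc : c = '-'
      · subst hc
        -- decompose the run
        set l := '-' :: rest' with hl
        set k := aMinusRun l with hk
        have hk1 : 1 ≤ k := aMinusRun_pos l (by simp [hl])
        have hkle : k ≤ l.length := aMinusRun_le l
        have hdropi : (done ++ l).drop done.length = l := List.drop_left ..
        have hdropik : (done ++ l).drop (done.length + k) = l.drop k := by
          simp [List.drop_append]
        have htakei : (done ++ l).take done.length = done := List.take_left ..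
        have hdec : List.replicate k '-' ++ l.drop k = l := aMinusRun_decomp l
        have hhd : (l.drop k).head? ≠ some '-' := aMinusRun_head_drop l
        have hBside : bRun done 0 l = bRun (bFlush done k) 0 (l.drop k) := by
          conv_lhs => rw [← hdec]
          rw [bRun_replicate, Nat.zero_add, bRun_flush _ _ _ hhd]
        rw [foldingLoop]
        rw [dif_pos hi]
        rw [dif_pos (by rw [hgi])]
        simp only [hdropi, ← hk, hdropik, htakei]
        by_cases hpar : k % 2 = 0 ∧ 1 < k
        · rw [if_pos hpar]
          have hflush : bFlush done k =
              if done.length > 0 && aPlusOk done then done ++ ['+'] else done := by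
            have h1 : ¬ k % 2 = 1 := by omega
            have h2 : k ≠ 0 := by omega
            have hc2 : (!done.isEmpty && bPlusOk done) = (done.length > 0 && aPlusOk done) := by
              cases done <;> simp [aPlusOk_eq_bPlusOk]
            simp only [bFlush, if_pos h2, if_neg h1, hc2]
          by_cases hplus : done.length > 0 && aPlusOk done
          · rw [if_pos hplus]
            have : done ++ ['+'] ++ l.drop k = (done ++ ['+']) ++ l.drop k := rfl
            have hlen' : (l.drop k).length ≤ n := by
              simp only [List.length_drop]
              have : l.length ≤ n + 1 := hlen
              omega
            have := ih (l.drop k) hlen' (done ++ ['+'])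
            rw [show done.length + 1 = (done ++ ['+']).length by simp] at *
            rw [this]
            rw [hBside, hflush, if_pos hplus]
          · rw [if_neg hplus]
            -- run deleted: str = done ++ l.drop k, index done.length + 1 skips one char
            rw [hBside, hflush, if_neg hplus]
            cases hdk : l.drop k with
            | nil =>
              rw [foldingLoop]
              have : ¬ done.length + 1 < (done ++ ([] : List Char)).length := by simp
              rw [dif_neg this]
              simp [bRun_nil, bFlush_zero]
            | cons d rem =>
              have hd : d ≠ '-' := by
                rw [hdk] at hhd; simpa using hhd
              have hlen' : rem.length ≤ n := by
                have := congrArg List.length hdk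
                simp only [List.length_drop, List.length_cons] at this
                have : l.length ≤ n + 1 := hlen
                omega
              have hsplit : done ++ d :: rem = (done ++ [d]) ++ rem := by simp
              rw [hsplit, show done.length + 1 = (done ++ [d]).length by simp]
              rw [ih rem hlen' (done ++ [d])]
              rw [bRun_cons_ne _ _ _ _ hd, bFlush_zero]
        · rw [if_neg hpar]
          have hodd : k % 2 = 1 := by omega
          have hflush : bFlush done k = done ++ ['-'] := by
            unfold bFlush
            simp [hodd, show k ≠ 0 by omega]
          have hlen' : (l.drop k).length ≤ n := by
            simp only [List.length_drop]
            have : l.length ≤ n + 1 := hlen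
            omega
          have hsplit : done ++ ['-'] ++ l.drop k = (done ++ ['-']) ++ l.drop k := by simp
          rw [hsplit, show done.length + 1 = (done ++ ['-']).length by simp]
          rw [ih (l.drop k) hlen' (done ++ ['-'])]
          rw [hBside, hflush]
      · -- non-minus character: just advance
        rw [foldingLoop]
        rw [dif_pos hi]
        rw [dif_neg (by rw [hgi]; exact hc)]
        have hsplit : done ++ c :: rest' = (done ++ [c]) ++ rest' := by simp
        have hlen' : rest'.length ≤ n := by simp at hlen; omega
        rw [hsplit, show done.length + 1 = (done ++ [c]).length by simp]
        rw [ih rest' hlen' (done ++ [c])]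
        rw [bRun_cons_ne _ _ _ _ hc, bFlush_zero]

-- ===== VERDICT (by name: the statement is the Claim_ definition above) =====
theorem folding_spec : Claim_equal_folding := by
  intro str _
  unfold Spec_folding folding folding_alt
  have h := loop_eq str.toList.length str.toList le_rfl []
  simp only [List.nil_append, List.length_nil] at h
  rw [h]
  rfl
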